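-- pv_equiv track=rewrite | github.com/apoorvar5/Decipher_Columnar_Shift_and_Transposition_Shift | decrypt.py | calculate_shifts
-- ===== SOURCE A (Python) =====
-- ALPHABET = "ABCDEFGHIJKLMNOPQRSTUVWXYZ"
--
-- def calculate_shifts(sorted_characters):
--     shifts = set()
--     most_common_arr = ['E', 'T', 'A', 'O', 'I', 'N', 'S', 'R', 'H', 'L']
--
--     for sorted_char in sorted_characters:
--         alpha_index = ALPHABET.index(sorted_char)
--         done = False
--         shift = 1
--
--         while not done:
--             if alpha_index - shift < 0:
--                 remainder = abs(alpha_index - shift) % 25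
--                 shifted_char = ALPHABET[26 - remainder]
--             else:
--                 shifted_char = ALPHABET[alpha_index - shift]
--
--             if shifted_char in most_common_arr:
--                 shifts.add(shift)
--                 done = True
--             shift += 1
--
--     return shifts
-- ===== SOURCE B (Python) =====
-- ALPHABET = "ABCDEFGHIJKLMNOPQRSTUVWXYZ"
--
-- def calculate_shifts(sorted_characters):
--     # E T A O I N S R H L as alphabet indices, precomputed once
--     common_indices = [4, 19, 0, 14, 8, 13, 18, 17, 7, 11]
--     shifts = set()
--     for sorted_char in sorted_characters:
--         idx = ALPHABET.index(sorted_char)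
--         shifts.add(min(d for d in ((idx - j) % 26 for j in common_indices) if d != 0))
--     return shifts
-- ===== Notes on version B (the rewrite author's own statement) =====
-- stated objective: alternative
-- what changed: Instead of scanning shifts 1,2,3,... with a hand-rolled (buggy but unreachable) wrap and testing letter membership, B precomputes the ten common-letter alphabet indices once and takes the minimum strictly-positive backward distance (idx - j) % 26 in one pass over that set.
import Mathlib
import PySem

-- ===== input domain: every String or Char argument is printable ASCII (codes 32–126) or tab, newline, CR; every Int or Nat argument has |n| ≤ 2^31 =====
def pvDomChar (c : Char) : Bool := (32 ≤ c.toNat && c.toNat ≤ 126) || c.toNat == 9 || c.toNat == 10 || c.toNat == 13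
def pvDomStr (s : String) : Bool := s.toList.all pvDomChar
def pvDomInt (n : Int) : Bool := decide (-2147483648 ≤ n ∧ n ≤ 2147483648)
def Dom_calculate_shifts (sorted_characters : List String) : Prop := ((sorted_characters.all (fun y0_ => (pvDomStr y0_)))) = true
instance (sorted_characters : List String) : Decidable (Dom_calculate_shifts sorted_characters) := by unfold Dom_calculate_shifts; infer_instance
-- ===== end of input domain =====

-- ===== PORT A =====
-- B differs by computing each char's shift as a min over the precomputed common-letter indices
-- instead of scanning shifts 1,2,3,... and testing membership (objective: alternative).
def pvAlpha : String := "ABCDEFGHIJKLMNOPQRSTUVWXYZ"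

def pvCommonA : List Char := ['E', 'T', 'A', 'O', 'I', 'N', 'S', 'R', 'H', 'L']

-- the while loop of A; fuel only makes the recursion structural (26 always suffices under Pre_)
def pvLoopA (alpha_index shift : Int) : Nat → Option Int
  | 0 => none
  | fuel + 1 =>
    let shifted_char? :=
      if alpha_index - shift < 0 then
        PySem.Str.pyGet? pvAlpha (26 - PySem.Int.mod |alpha_index - shift| 25)
      else
        PySem.Str.pyGet? pvAlpha (alpha_index - shift)
    match shifted_char? with
    | none => none  -- IndexError (unreachable under Pre_)
    | some c => if c ∈ pvCommonA then some shift else pvLoopA alpha_index (shift + 1) fuel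

-- one iteration of A's for-loop
def pvStepA (shifts : List Int) (sorted_char : String) : List Int :=
  let alpha_index := PySem.Str.find pvAlpha sorted_char
  if alpha_index = -1 then shifts  -- ValueError of ALPHABET.index (excluded by Pre_)
  else
    match pvLoopA alpha_index 1 26 with
    | none => shifts  -- unreachable under Pre_
    | some shift => PySem.Set.add shifts shift

def calculate_shifts (sorted_characters : List String) : List Int :=
  sorted_characters.foldl pvStepA []

-- ===== PORT B =====
def pvCommonIdx : List Int := [4, 19, 0, 14, 8, 13, 18, 17, 7, 11]

-- one iteration of B's for-loop
def pvStepB (shifts : List Int) (sorted_char : String) : List Int :=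
  let idx := PySem.Str.find pvAlpha sorted_char
  if idx = -1 then shifts  -- ValueError of ALPHABET.index (excluded by Pre_)
  else
    match PySem.List.min?
        ((pvCommonIdx.map (fun j => PySem.Int.mod (idx - j) 26)).filter (fun d => d != 0))
        (fun x => x) with
    | none => shifts  -- min() of an empty iterable (unreachable: the ten residues never all vanish)
    | some m => PySem.Set.add shifts m

def calculate_shifts_alt (sorted_characters : List String) : List Int :=
  sorted_characters.foldl pvStepB []

-- ===== PRECONDITION & SPEC =====
-- Pre_ excludes exactly the inputs where ALPHABET.index raises ValueError: a string that is not a substring of the alphabet.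
def Pre_calculate_shifts (sorted_characters : List String) : Prop :=
  ∀ s ∈ sorted_characters, PySem.Str.find "ABCDEFGHIJKLMNOPQRSTUVWXYZ" s ≠ -1

instance (sorted_characters : List String) : Decidable (Pre_calculate_shifts sorted_characters) := by
  unfold Pre_calculate_shifts; infer_instance

def pvWitness_calculate_shifts : List String := ["E", "Z", "AB", "Q"]

def Spec_calculate_shifts (sorted_characters : List String) (out : List Int) : Prop := out = calculate_shifts_alt sorted_characters
instance (sorted_characters : List String) (out : List Int) : Decidable (Spec_calculate_shifts sorted_characters out) := by unfold Spec_calculate_shifts; infer_instance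

-- ===== CLAIM (what is proved, stated in full; the proofs are below) =====
def Claim_equal_calculate_shifts : Prop := ∀ (sorted_characters : List String), Dom_calculate_shifts sorted_characters → Pre_calculate_shifts sorted_characters → Spec_calculate_shifts sorted_characters (calculate_shifts sorted_characters)

-- ===== LEMMAS AND PROOFS =====

-- a found index into the 26-letter alphabet lies in [0, 25]
theorem pv_find_alpha_bound (s : String)
    (h : PySem.Str.find pvAlpha s ≠ -1) :
    0 ≤ PySem.Str.find pvAlpha s ∧ PySem.Str.find pvAlpha s ≤ 25 := by
  simp only [PySem.Str.find_eq] at h ⊢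
  have h0 : 0 ≤ PySem.Chars.find pvAlpha.toList s.toList :=
    (PySem.Chars.find_nonneg_iff _ _).mpr ((PySem.Chars.find_ne_neg_one_iff _ _).mp h)
  have hle : PySem.Chars.find pvAlpha.toList s.toList ≤ ((pvAlpha.toList).length : Int) :=
    PySem.Chars.find_le_length _ _
  have hlen : (pvAlpha.toList).length = 26 := by decide
  rw [hlen] at hle
  have hne : PySem.Chars.find pvAlpha.toList s.toList ≠ 26 := by
    intro h26
    have hspec := (PySem.Chars.find_spec (s := pvAlpha.toList) (sub := s.toList) h0).1
    rw [h26] at hspec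
    have hdrop : (pvAlpha.toList).drop (Int.toNat 26) = [] := by decide
    rw [hdrop] at hspec
    have hnil : s.toList = [] := List.prefix_nil.mp hspec
    rw [hnil, PySem.Chars.find_nil] at h26
    exact absurd h26 (by decide)
  refine ⟨h0, ?_⟩
  omega

-- per-index agreement of the two per-character computations
theorem pv_inner_eq (ai : Int) (h0 : 0 ≤ ai) (h1 : ai ≤ 25) :
    pvLoopA ai 1 26 =
      PySem.List.min?
        ((pvCommonIdx.map (fun j => PySem.Int.mod (ai - j) 26)).filter (fun d => d != 0))
        (fun x => x) := by
  interval_cases ai <;> decide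

theorem pv_step_eq (shifts : List Int) (s : String)
    (hs : PySem.Str.find pvAlpha s ≠ -1) :
    pvStepA shifts s = pvStepB shifts s := by
  have hb := pv_find_alpha_bound s hs
  unfold pvStepA pvStepB
  simp only [if_neg hs]
  rw [pv_inner_eq _ hb.1 hb.2]

theorem pv_fold_eq (cs : List String) (acc : List Int)
    (h : ∀ s ∈ cs, PySem.Str.find "ABCDEFGHIJKLMNOPQRSTUVWXYZ" s ≠ -1) :
    cs.foldl pvStepA acc = cs.foldl pvStepB acc := by
  induction cs generalizing acc with
  | nil => rfl
  | cons s cs ih =>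
    have hs : PySem.Str.find pvAlpha s ≠ -1 := h s List.mem_cons_self
    simp only [List.foldl_cons]
    rw [pv_step_eq acc s hs]
    exact ih _ (fun t ht => h t (List.mem_cons_of_mem _ ht))

-- ===== VERDICT (by name: the statement is the Claim_ definition above) =====
theorem calculate_shifts_spec : Claim_equal_calculate_shifts := by
  intro cs _ hpre
  show calculate_shifts cs = calculate_shifts_alt cs
  unfold calculate_shifts calculate_shifts_alt
  exact pv_fold_eq cs [] hpre
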